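-- pv_equiv track=rewrite | github.com/sawyerWeld/Graphics | graphics_objects.py | bressenhelm
-- ===== SOURCE A (Python) =====
-- def bressenhelm(start, end):
--     x0,y0 = start
--     x1,y1 = end
--     dx = x1 - x0
--     dy = y1 - y0
--     pts = []
--
--     # If slope > 1, we rotate
--     rotated = False
--     if (abs(dy) > abs(dx)):
--         rotated = True
--         x0,y0 = y0,x0
--         x1,y1 = y1,x1
--
--     # Lines go left to right
--     # If they dont, swap the points
--     if x0 > x1:
--         x0,x1 = x1,x0
--         y0,y1 = y1,y0
--     dx = x1 - x0
--     dy = y1 - y0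
--     err = int(dx / 2.0)
--     y_inc = 1 if y0 < y1 else -1
--
--     y = y0
--     for x in range(x0, x1 + 1):
--         # for i in range(stroke_w):
--         # i would be added to y in each
--         point = (y, x) if rotated else (x, y)
--             # pt(point)
--         pts.append(point)
--         err -= abs(dy)
--         if err < 0:
--             y += y_inc
--             err += dx
--
--     return sorted(pts, key = lambda x: x[1], reverse=True)
-- ===== SOURCE B (Python) =====
-- def bressenhelm(start, end):
--     x0, y0 = start
--     x1, y1 = end
--     rotated = abs(y1 - y0) > abs(x1 - x0)
--     if rotated:
--         x0, y0, x1, y1 = y0, x0, y1, x1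
--     if x0 > x1:
--         x0, y0, x1, y1 = x1, y1, x0, y0
--     dx = x1 - x0
--     a = abs(y1 - y0)
--     err = dx // 2
--     y = y0
--     if rotated:
--         # the sort key is x, which grows along the walk: answer = walk reversed
--         y_inc = 1 if y0 < y1 else -1
--         pts = []
--         for x in range(x0, x1 + 1):
--             pts.append((y, x))
--             err -= a
--             if err < 0:
--                 y += y_inc
--                 err += dx
--         pts.reverse()
--         return pts
--     if y0 >= y1:
--         # the sort key is y, which never grows: the walk order is the answer
--         pts = []
--         for x in range(x0, x1 + 1):
--             pts.append((x, y))
--             err -= a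
--             if err < 0:
--                 y -= 1
--                 err += dx
--         return pts
--     # the sort key is y, which grows exactly at the error steps: collect the
--     # maximal equal-y runs as they close and emit them back to front (stable)
--     blocks = []
--     block = []
--     for x in range(x0, x1 + 1):
--         block.append((x, y))
--         err -= a
--         if err < 0:
--             blocks.append(block)
--             block = []
--             y += 1
--             err += dx
--     if block:
--         blocks.append(block)
--     blocks.reverse()
--     return [p for b in blocks for p in b]
-- ===== Notes on version B (the rewrite author's own statement) =====
-- stated objective: alternative
-- what changed: A sorts the generated Bresenham points with sorted(key=p[1], reverse=True); B exploits that this key is monotone along the walk and emits the points directly in the required order (walk order, reversed walk, or maximal equal-key runs back to front), eliminating the sort.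
import Mathlib
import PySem

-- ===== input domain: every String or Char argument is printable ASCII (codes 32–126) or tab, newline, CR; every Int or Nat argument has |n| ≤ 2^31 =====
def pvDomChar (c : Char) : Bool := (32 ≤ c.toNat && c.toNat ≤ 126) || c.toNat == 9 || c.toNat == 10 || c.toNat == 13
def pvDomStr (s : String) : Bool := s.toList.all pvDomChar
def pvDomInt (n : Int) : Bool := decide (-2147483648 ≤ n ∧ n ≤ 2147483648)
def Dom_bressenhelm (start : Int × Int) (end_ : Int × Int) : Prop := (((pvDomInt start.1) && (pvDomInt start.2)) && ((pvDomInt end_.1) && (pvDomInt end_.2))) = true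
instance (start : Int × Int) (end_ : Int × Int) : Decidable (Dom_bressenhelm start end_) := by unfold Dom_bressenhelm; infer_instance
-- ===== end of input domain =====

-- B removes A's final sort: the walk's second coordinate is monotone, so B emits
-- the points directly in sorted order (reverse / as-is / equal-key runs back to front). (objective: alternative)


-- ===== PORT A =====
def bressenhelm (start : Int × Int) (end_ : Int × Int) : List (Int × Int) :=
  let x0 := start.1; let y0 := start.2
  let x1 := end_.1; let y1 := end_.2
  -- if abs(dy) > abs(dx): rotate (swap the coordinates of both points)
  let rotated := |y1 - y0| > |x1 - x0|
  let p := if rotated then ((y0, x0), (y1, x1)) else ((x0, y0), (x1, y1))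
  -- if x0 > x1: swap the two points
  let q := if p.1.1 > p.2.1 then (p.2, p.1) else p
  let x0 := q.1.1; let y0 := q.1.2; let x1 := q.2.1; let y1 := q.2.2
  let dx := x1 - x0
  let dy := y1 - y0
  -- err = int(dx / 2.0): exact as truncating division (|dx| ≤ 2^33 < 2^53, and x/2.0 is an exact float)
  let err := PySem.Int.truncdiv dx 2
  let y_inc : Int := if y0 < y1 then 1 else -1
  let st := (PySem.List.pyRange x0 (x1 + 1) 1).foldl (fun (st : List (Int × Int) × Int × Int) x =>
      let y := st.2.1
      let point := if rotated then (y, x) else (x, y)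
      let pts := st.1 ++ [point]
      let err := st.2.2 - |dy|
      if err < 0 then (pts, y + y_inc, err + dx) else (pts, y, err)) ([], y0, err)
  PySem.List.sorted st.1 (fun p => p.2) true

-- ===== PORT B =====
def bressenhelm_alt (start : Int × Int) (end_ : Int × Int) : List (Int × Int) :=
  let x0 := start.1; let y0 := start.2
  let x1 := end_.1; let y1 := end_.2
  let rotated := |y1 - y0| > |x1 - x0|
  let p := if rotated then ((y0, x0), (y1, x1)) else ((x0, y0), (x1, y1))
  let q := if p.1.1 > p.2.1 then (p.2, p.1) else p
  let x0 := q.1.1; let y0 := q.1.2; let x1 := q.2.1; let y1 := q.2.2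
  let dx := x1 - x0
  let a := |y1 - y0|
  let err := PySem.Int.floordiv dx 2
  if rotated then
    -- the sort key is x, which grows along the walk: answer = walk reversed
    let y_inc : Int := if y0 < y1 then 1 else -1
    let st := (PySem.List.pyRange x0 (x1 + 1) 1).foldl (fun (st : List (Int × Int) × Int × Int) x =>
        let pts := st.1 ++ [(st.2.1, x)]
        let err := st.2.2 - a
        if err < 0 then (pts, st.2.1 + y_inc, err + dx) else (pts, st.2.1, err)) ([], y0, err)
    st.1.reverse
  else if y0 ≥ y1 then
    -- the sort key is y, which never grows: the walk order is the answer
    let st := (PySem.List.pyRange x0 (x1 + 1) 1).foldl (fun (st : List (Int × Int) × Int × Int) x =>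
        let pts := st.1 ++ [(x, st.2.1)]
        let err := st.2.2 - a
        if err < 0 then (pts, st.2.1 - 1, err + dx) else (pts, st.2.1, err)) ([], y0, err)
    st.1
  else
    -- the sort key is y, which grows exactly at the error steps: collect the
    -- maximal equal-y runs as they close and emit them back to front (stable)
    let st := (PySem.List.pyRange x0 (x1 + 1) 1).foldl
      (fun (st : List (List (Int × Int)) × List (Int × Int) × Int × Int) x =>
        let block := st.2.1 ++ [(x, st.2.2.1)]
        let err := st.2.2.2 - a
        if err < 0 then (st.1 ++ [block], [], st.2.2.1 + 1, err + dx)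
        else (st.1, block, st.2.2.1, err)) ([], [], y0, err)
    let blocks := if st.2.1.isEmpty then st.1 else st.1 ++ [st.2.1]
    blocks.reverse.flatten

-- ===== PRECONDITION & SPEC =====
def Spec_bressenhelm (start : Int × Int) (end_ : Int × Int) (out : List (Int × Int)) : Prop := out = bressenhelm_alt start end_
instance (start : Int × Int) (end_ : Int × Int) (out : List (Int × Int)) : Decidable (Spec_bressenhelm start end_ out) := by unfold Spec_bressenhelm; infer_instance

-- ===== CLAIM (what is proved, stated in full; the proofs are below) =====
def Claim_equal_bressenhelm : Prop := ∀ (start : Int × Int) (end_ : Int × Int), Dom_bressenhelm start end_ → Spec_bressenhelm start end_ (bressenhelm start end_)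

-- ===== LEMMAS AND PROOFS =====

-- walk trace: (y, err) after k steps
def pvWy (y0 e0 a d s : Int) : Nat → Int × Int
  | 0 => (y0, e0)
  | k+1 =>
    let p := pvWy y0 e0 a d s k
    if p.2 - a < 0 then (p.1 + s, p.2 - a + d) else (p.1, p.2 - a)

theorem pv_walk (mk : Int → Int → Int × Int) (a d s x0 y0 e0 : Int) (j : Nat) :
    ((List.range j).map (fun (i : Nat) => x0 + (i : Int))).foldl
      (fun (st : List (Int × Int) × Int × Int) x =>
        let y := st.2.1
        let pts := st.1 ++ [mk x y]
        let err := st.2.2 - a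
        if err < 0 then (pts, y + s, err + d) else (pts, y, err))
      ([], y0, e0)
    = ((List.range j).map (fun (k : Nat) => mk (x0 + (k : Int)) ((pvWy y0 e0 a d s k).1)),
       (pvWy y0 e0 a d s j).1, (pvWy y0 e0 a d s j).2) := by
  induction j with
  | zero => simp [pvWy]
  | succ n ih =>
    simp only [List.range_succ, List.map_append, List.foldl_append, ih,
      List.map_cons, List.map_nil, List.foldl_cons, List.foldl_nil]
    rw [show pvWy y0 e0 a d s (n+1) =
        (if (pvWy y0 e0 a d s n).2 - a < 0 then
          ((pvWy y0 e0 a d s n).1 + s, (pvWy y0 e0 a d s n).2 - a + d)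
        else ((pvWy y0 e0 a d s n).1, (pvWy y0 e0 a d s n).2 - a)) from rfl]
    split <;> simp

theorem pv_insertBy_nil {α : Type} (before : α → α → Bool) (x : α) :
    PySem.List.insertBy before x [] = [x] := rfl

theorem pv_insertBy_cons {α : Type} (before : α → α → Bool) (x y : α) (ys : List α) :
    PySem.List.insertBy before x (y :: ys) =
      if before x y then x :: y :: ys else y :: PySem.List.insertBy before x ys := rfl

theorem pv_insertBy_skip {α : Type} (before : α → α → Bool) (x : α) (pre rest : List α)
    (h : ∀ y ∈ pre, before x y = false) :
    PySem.List.insertBy before x (pre ++ rest) = pre ++ PySem.List.insertBy before x rest := by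
  induction pre with
  | nil => simp
  | cons y ys ih =>
    simp only [List.cons_append, pv_insertBy_cons, h y (by simp)]
    simp only [Bool.false_eq_true, if_false, List.cons.injEq, true_and]
    exact ih (fun z hz => h z (by simp [hz]))

-- inserting a whole run of equal-key elements (key kb) after an equal-key prefix
-- and before strictly smaller keys appends the run after the prefix
theorem pv_block_insert {α κ : Type} [LinearOrder κ] (key : α → κ) (kb : κ)
    (b : List α) (pre acc : List α)
    (hb : ∀ p ∈ b, key p = kb) (hpre : ∀ p ∈ pre, key p = kb)
    (hacc : ∀ p ∈ acc, key p < kb) :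
    b.foldl (fun acc x => PySem.List.insertBy (fun a b => decide (key b < key a)) x acc)
      (pre ++ acc) = pre ++ b ++ acc := by
  induction b generalizing pre with
  | nil => simp
  | cons x xs ih =>
    have hx : key x = kb := hb x (by simp)
    have h1 : PySem.List.insertBy (fun a b => decide (key b < key a)) x (pre ++ acc)
        = (pre ++ [x]) ++ acc := by
      rw [pv_insertBy_skip]
      · cases acc with
        | nil => simp [pv_insertBy_nil]
        | cons z zs =>
          rw [pv_insertBy_cons]
          have : key z < key x := by rw [hx]; exact hacc z (by simp)
          simp [this]
      · intro y hy
        simp [hpre y hy, hx]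
    simp only [List.foldl_cons, h1]
    have hih := ih (fun p hp => hb p (by simp [hp])) (pre := pre ++ [x])
      (by intro p hp; rcases List.mem_append.mp hp with h | h
          · exact hpre p h
          · simp at h; simpa [h] using hx)
    rw [hih]; simp

-- stable descending sort of a concatenation of constant-key runs with strictly
-- increasing keys reverses the order of the runs
theorem pv_sorted_rev_blocks {α κ : Type} [LinearOrder κ] (key : α → κ) (bs : List (List α))
    (hconst : ∀ b ∈ bs, ∀ p ∈ b, ∀ q ∈ b, key p = key q)
    (hmono : bs.Pairwise (fun b b' => ∀ p ∈ b, ∀ q ∈ b', key p < key q)) :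
    PySem.List.sorted bs.flatten key true = bs.reverse.flatten := by
  induction bs using List.reverseRecOn with
  | nil => simp [PySem.List.sorted]
  | append_singleton bs b ih =>
    rw [PySem.List.sorted_rev_eq_foldl_insertBy] at *
    rw [List.flatten_append, List.flatten_cons, List.flatten_nil, List.append_nil,
      List.foldl_append]
    rw [ih (fun b' hb' => hconst b' (by simp [hb'])) (List.Pairwise.sublist (by simp) hmono)]
    cases hbe : b with
    | nil => simp
    | cons p0 ps =>
      have hb : ∀ p ∈ b, key p = key p0 := by
        intro p hp
        exact hconst b (by simp) p hp p0 (by rw [hbe]; simp)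
      have hacc : ∀ p ∈ bs.reverse.flatten, key p < key p0 := by
        intro p hp
        rw [List.mem_flatten] at hp
        obtain ⟨b', hb', hpb'⟩ := hp
        rw [List.mem_reverse] at hb'
        have := (List.pairwise_append.mp hmono).2.2 b' hb' b (by simp)
        exact this p hpb' p0 (by rw [hbe]; simp)
      rw [← hbe]
      have := pv_block_insert key (key p0) b [] bs.reverse.flatten hb (by simp) hacc
      simp only [List.nil_append] at this
      rw [this, List.reverse_append, List.reverse_singleton, List.singleton_append,
        List.flatten_cons]

theorem pv_wy_anti (y0 e0 a d : Int) {k l : Nat} (h : k ≤ l) :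
    (pvWy y0 e0 a d (-1) l).1 ≤ (pvWy y0 e0 a d (-1) k).1 := by
  induction l, h using Nat.le_induction with
  | base => exact le_refl _
  | succ n hn ih =>
    refine le_trans ?_ ih
    show (pvWy y0 e0 a d (-1) (n+1)).1 ≤ _
    rw [show pvWy y0 e0 a d (-1) (n+1) =
        (if (pvWy y0 e0 a d (-1) n).2 - a < 0 then
          ((pvWy y0 e0 a d (-1) n).1 + -1, (pvWy y0 e0 a d (-1) n).2 - a + d)
        else ((pvWy y0 e0 a d (-1) n).1, (pvWy y0 e0 a d (-1) n).2 - a)) from rfl]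
    split <;> simp

theorem pv_sorted_rot (f : Nat → Int) (x0 : Int) (j : Nat) :
    PySem.List.sorted ((List.range j).map (fun (k : Nat) => (f k, x0 + (k : Int))))
      (fun p => p.2) true
    = ((List.range j).map (fun (k : Nat) => (f k, x0 + (k : Int)))).reverse := by
  apply PySem.List.sorted_rev_eq_of_perm_of_pairwise_gt
  · exact List.reverse_perm _
  · rw [List.pairwise_reverse, List.pairwise_map]
    exact List.Pairwise.imp (fun h => by simpa using by omega) List.pairwise_lt_range

theorem pv_sorted_desc (f : Nat → Int) (x0 : Int) (j : Nat)
    (hf : ∀ k l : Nat, k ≤ l → f l ≤ f k) :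
    PySem.List.sorted ((List.range j).map (fun (k : Nat) => (x0 + (k : Int), f k)))
      (fun p => p.2) true
    = (List.range j).map (fun (k : Nat) => (x0 + (k : Int), f k)) := by
  apply PySem.List.sorted_rev_eq_self_of_pairwise
  rw [List.pairwise_map]
  exact List.Pairwise.imp (fun h => hf _ _ (Nat.le_of_lt h)) List.pairwise_lt_range

-- B's run-collecting fold, for the ascending (y0 < y1, unrotated) branch
def pvF (a d : Int) (st : List (List (Int × Int)) × List (Int × Int) × Int × Int) (x : Int) :
    List (List (Int × Int)) × List (Int × Int) × Int × Int :=
  let block := st.2.1 ++ [(x, st.2.2.1)]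
  let err := st.2.2.2 - a
  if err < 0 then (st.1 ++ [block], [], st.2.2.1 + 1, err + d)
  else (st.1, block, st.2.2.1, err)

theorem pv_asc_inv (a d x0 y0 e0 : Int) (j : Nat) :
    (((List.range j).map (fun (i : Nat) => x0 + (i : Int))).foldl (pvF a d) ([], [], y0, e0)).2.2.1
        = (pvWy y0 e0 a d 1 j).1 ∧
    (((List.range j).map (fun (i : Nat) => x0 + (i : Int))).foldl (pvF a d) ([], [], y0, e0)).2.2.2
        = (pvWy y0 e0 a d 1 j).2 ∧
    (((List.range j).map (fun (i : Nat) => x0 + (i : Int))).foldl (pvF a d) ([], [], y0, e0)).1.flatten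
        ++ (((List.range j).map (fun (i : Nat) => x0 + (i : Int))).foldl (pvF a d) ([], [], y0, e0)).2.1
        = (List.range j).map (fun (k : Nat) => (x0 + (k : Int), (pvWy y0 e0 a d 1 k).1)) ∧
    (∀ p ∈ (((List.range j).map (fun (i : Nat) => x0 + (i : Int))).foldl (pvF a d) ([], [], y0, e0)).2.1,
        p.2 = (pvWy y0 e0 a d 1 j).1) ∧
    (∀ b ∈ (((List.range j).map (fun (i : Nat) => x0 + (i : Int))).foldl (pvF a d) ([], [], y0, e0)).1,
        ∀ p ∈ b, p.2 < (pvWy y0 e0 a d 1 j).1) ∧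
    (∀ b ∈ (((List.range j).map (fun (i : Nat) => x0 + (i : Int))).foldl (pvF a d) ([], [], y0, e0)).1,
        ∀ p ∈ b, ∀ q ∈ b, p.2 = q.2) ∧
    (((List.range j).map (fun (i : Nat) => x0 + (i : Int))).foldl (pvF a d) ([], [], y0, e0)).1.Pairwise
        (fun b b' => ∀ p ∈ b, ∀ q ∈ b', p.2 < q.2) := by
  induction j with
  | zero => simp [pvWy]
  | succ n ih =>
    obtain ⟨hy, he, hfl, hcur, hblk, hcst, hpw⟩ := ih
    set S := (((List.range n).map (fun (i : Nat) => x0 + (i : Int))).foldl (pvF a d) ([], [], y0, e0)) with hS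
    simp only [List.range_succ, List.map_append, List.foldl_append, List.map_cons, List.map_nil,
      List.foldl_cons, List.foldl_nil, ← hS]
    rw [show pvWy y0 e0 a d 1 (n+1) =
        (if (pvWy y0 e0 a d 1 n).2 - a < 0 then
          ((pvWy y0 e0 a d 1 n).1 + 1, (pvWy y0 e0 a d 1 n).2 - a + d)
        else ((pvWy y0 e0 a d 1 n).1, (pvWy y0 e0 a d 1 n).2 - a)) from rfl]
    rw [show pvF a d S (x0 + (n : Int)) =
        (if S.2.2.2 - a < 0 then (S.1 ++ [S.2.1 ++ [(x0 + (n : Int), S.2.2.1)]], [], S.2.2.1 + 1, S.2.2.2 - a + d)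
         else (S.1, S.2.1 ++ [(x0 + (n : Int), S.2.2.1)], S.2.2.1, S.2.2.2 - a)) from rfl]
    rw [hy, he]
    split
    · -- flush step
      refine ⟨rfl, rfl, ?_, by simp, ?_, ?_, ?_⟩
      · simp only [List.flatten_append, List.flatten_cons, List.flatten_nil, List.append_nil]
        rw [← List.append_assoc, hfl]
      · intro b hb p hp
        rcases List.mem_append.mp hb with h | h
        · exact lt_trans (hblk b h p hp) (by omega)
        · simp at h; subst h
          rcases List.mem_append.mp hp with h | h
          · have := hcur p h; omega
          · simp at h; subst h; dsimp only; omega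
      · intro b hb p hp q hq
        rcases List.mem_append.mp hb with h | h
        · exact hcst b h p hp q hq
        · simp at h; subst h
          have key : ∀ r ∈ S.2.1 ++ [(x0 + (n : Int), (pvWy y0 e0 a d 1 n).1)], r.2 = (pvWy y0 e0 a d 1 n).1 := by
            intro r hr
            rcases List.mem_append.mp hr with h | h
            · exact hcur r h
            · simp at h; simp [h]
          rw [key p hp, key q hq]
      · rw [List.pairwise_append]
        refine ⟨hpw, by simp, ?_⟩
        intro b hb b' hb' p hp q hq
        simp at hb'; subst hb'
        rcases List.mem_append.mp hq with h | h
        · have := hcur q h; have := hblk b hb p hp; omega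
        · simp at h; subst h; simpa using hblk b hb p hp
    · -- plain step
      refine ⟨rfl, rfl, ?_, ?_, hblk, hcst, hpw⟩
      · rw [← List.append_assoc, hfl]
      · intro p hp
        rcases List.mem_append.mp hp with h | h
        · exact hcur p h
        · simp at h; simp [h]

theorem pv_core_asc (a d x0 y0 e0 : Int) (j : Nat) :
    PySem.List.sorted
      ((List.range j).map (fun (k : Nat) => (x0 + (k : Int), (pvWy y0 e0 a d 1 k).1)))
      (fun p => p.2) true
    = (if (((List.range j).map (fun (i : Nat) => x0 + (i : Int))).foldl (pvF a d)
            ([], [], y0, e0)).2.1.isEmpty then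
          (((List.range j).map (fun (i : Nat) => x0 + (i : Int))).foldl (pvF a d)
            ([], [], y0, e0)).1
        else
          (((List.range j).map (fun (i : Nat) => x0 + (i : Int))).foldl (pvF a d)
            ([], [], y0, e0)).1 ++
            [(((List.range j).map (fun (i : Nat) => x0 + (i : Int))).foldl (pvF a d)
            ([], [], y0, e0)).2.1]).reverse.flatten := by
  obtain ⟨hy, he, hfl, hcur, hblk, hcst, hpw⟩ := pv_asc_inv a d x0 y0 e0 j
  set S := (((List.range j).map (fun (i : Nat) => x0 + (i : Int))).foldl (pvF a d)
    ([], [], y0, e0)) with hS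
  by_cases hc : S.2.1 = []
  · rw [hc] at hfl
    rw [List.append_nil] at hfl
    rw [← hfl, hc]
    simp only [List.isEmpty_nil, if_true]
    exact pv_sorted_rev_blocks (fun p => p.2) S.1 hcst hpw
  · rw [← hfl]
    simp only [List.isEmpty_iff, hc, if_false]
    rw [show S.1.flatten ++ S.2.1 = (S.1 ++ [S.2.1]).flatten by simp]
    apply pv_sorted_rev_blocks
    · intro b hb p hp q hq
      rcases List.mem_append.mp hb with h | h
      · exact hcst b h p hp q hq
      · simp at h; subst h
        rw [hcur p hp, hcur q hq]
    · rw [List.pairwise_append]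
      refine ⟨hpw, by simp, ?_⟩
      intro b hb b' hb' p hp q hq
      simp at hb'; subst hb'
      rw [hcur q hq]
      exact hblk b hb p hp


theorem pv_trunc_floor (d : Int) (h : 0 ≤ d) :
    PySem.Int.truncdiv d 2 = PySem.Int.floordiv d 2 := by
  rw [PySem.Int.floordiv_eq_ediv_of_pos (by omega : (0:Int) < 2)]
  exact Int.tdiv_eq_ediv_of_nonneg h

theorem pv_walk_yx (a d s x0 y0 e0 : Int) (j : Nat) :
    ((List.range j).map (fun (i : Nat) => x0 + (i : Int))).foldl
      (fun (st : List (Int × Int) × Int × Int) x =>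
        if st.2.2 - a < 0 then (st.1 ++ [(st.2.1, x)], st.2.1 + s, st.2.2 - a + d)
        else (st.1 ++ [(st.2.1, x)], st.2.1, st.2.2 - a))
      ([], y0, e0)
    = ((List.range j).map (fun (k : Nat) => ((pvWy y0 e0 a d s k).1, x0 + (k : Int))),
       (pvWy y0 e0 a d s j).1, (pvWy y0 e0 a d s j).2) :=
  pv_walk (fun x y => (y, x)) a d s x0 y0 e0 j

theorem pv_walk_xy (a d s x0 y0 e0 : Int) (j : Nat) :
    ((List.range j).map (fun (i : Nat) => x0 + (i : Int))).foldl
      (fun (st : List (Int × Int) × Int × Int) x =>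
        if st.2.2 - a < 0 then (st.1 ++ [(x, st.2.1)], st.2.1 + s, st.2.2 - a + d)
        else (st.1 ++ [(x, st.2.1)], st.2.1, st.2.2 - a))
      ([], y0, e0)
    = ((List.range j).map (fun (k : Nat) => (x0 + (k : Int), (pvWy y0 e0 a d s k).1)),
       (pvWy y0 e0 a d s j).1, (pvWy y0 e0 a d s j).2) :=
  pv_walk (fun x y => (x, y)) a d s x0 y0 e0 j

theorem pv_walk_xy_sub (a d x0 y0 e0 : Int) (j : Nat) :
    ((List.range j).map (fun (i : Nat) => x0 + (i : Int))).foldl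
      (fun (st : List (Int × Int) × Int × Int) x =>
        if st.2.2 - a < 0 then (st.1 ++ [(x, st.2.1)], st.2.1 - 1, st.2.2 - a + d)
        else (st.1 ++ [(x, st.2.1)], st.2.1, st.2.2 - a))
      ([], y0, e0)
    = ((List.range j).map (fun (k : Nat) => (x0 + (k : Int), (pvWy y0 e0 a d (-1) k).1)),
       (pvWy y0 e0 a d (-1) j).1, (pvWy y0 e0 a d (-1) j).2) :=
  pv_walk (fun x y => (x, y)) a d (-1) x0 y0 e0 j


theorem pv_rot_case (a s x0 y0 x1 : Int) (h : x0 ≤ x1) :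
    PySem.List.sorted
      ((PySem.List.pyRange x0 (x1 + 1) 1).foldl
        (fun (st : List (Int × Int) × Int × Int) x =>
          if st.2.2 - a < 0 then (st.1 ++ [(st.2.1, x)], st.2.1 + s, st.2.2 - a + (x1 - x0))
          else (st.1 ++ [(st.2.1, x)], st.2.1, st.2.2 - a))
        ([], y0, PySem.Int.truncdiv (x1 - x0) 2)).1 (fun p => p.2) true
    = ((PySem.List.pyRange x0 (x1 + 1) 1).foldl
        (fun (st : List (Int × Int) × Int × Int) x =>
          if st.2.2 - a < 0 then (st.1 ++ [(st.2.1, x)], st.2.1 + s, st.2.2 - a + (x1 - x0))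
          else (st.1 ++ [(st.2.1, x)], st.2.1, st.2.2 - a))
        ([], y0, PySem.Int.floordiv (x1 - x0) 2)).1.reverse := by
  rw [pv_trunc_floor _ (by omega), PySem.List.pyRange_one, pv_walk_yx]
  exact pv_sorted_rot _ x0 _

theorem pv_desc_case (a x0 y0 x1 : Int) (h : x0 ≤ x1) :
    PySem.List.sorted
      ((PySem.List.pyRange x0 (x1 + 1) 1).foldl
        (fun (st : List (Int × Int) × Int × Int) x =>
          if st.2.2 - a < 0 then (st.1 ++ [(x, st.2.1)], st.2.1 + -1, st.2.2 - a + (x1 - x0))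
          else (st.1 ++ [(x, st.2.1)], st.2.1, st.2.2 - a))
        ([], y0, PySem.Int.truncdiv (x1 - x0) 2)).1 (fun p => p.2) true
    = ((PySem.List.pyRange x0 (x1 + 1) 1).foldl
        (fun (st : List (Int × Int) × Int × Int) x =>
          if st.2.2 - a < 0 then (st.1 ++ [(x, st.2.1)], st.2.1 - 1, st.2.2 - a + (x1 - x0))
          else (st.1 ++ [(x, st.2.1)], st.2.1, st.2.2 - a))
        ([], y0, PySem.Int.floordiv (x1 - x0) 2)).1 := by
  rw [pv_trunc_floor _ (by omega), PySem.List.pyRange_one, pv_walk_xy_sub]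
  have := pv_walk_xy a (x1 - x0) (-1) x0 y0 (PySem.Int.floordiv (x1 - x0) 2) ((x1 + 1 - x0).toNat)
  rw [this]
  exact pv_sorted_desc _ x0 _ (fun k l hkl => pv_wy_anti _ _ _ _ hkl)

theorem pv_asc_case (a x0 y0 x1 : Int) (h : x0 ≤ x1) :
    PySem.List.sorted
      ((PySem.List.pyRange x0 (x1 + 1) 1).foldl
        (fun (st : List (Int × Int) × Int × Int) x =>
          if st.2.2 - a < 0 then (st.1 ++ [(x, st.2.1)], st.2.1 + 1, st.2.2 - a + (x1 - x0))
          else (st.1 ++ [(x, st.2.1)], st.2.1, st.2.2 - a))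
        ([], y0, PySem.Int.truncdiv (x1 - x0) 2)).1 (fun p => p.2) true
    = (if ((PySem.List.pyRange x0 (x1 + 1) 1).foldl (pvF a (x1 - x0))
            ([], [], y0, PySem.Int.floordiv (x1 - x0) 2)).2.1.isEmpty then
        ((PySem.List.pyRange x0 (x1 + 1) 1).foldl (pvF a (x1 - x0))
            ([], [], y0, PySem.Int.floordiv (x1 - x0) 2)).1
      else
        ((PySem.List.pyRange x0 (x1 + 1) 1).foldl (pvF a (x1 - x0))
            ([], [], y0, PySem.Int.floordiv (x1 - x0) 2)).1 ++
          [((PySem.List.pyRange x0 (x1 + 1) 1).foldl (pvF a (x1 - x0))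
            ([], [], y0, PySem.Int.floordiv (x1 - x0) 2)).2.1]).reverse.flatten := by
  rw [pv_trunc_floor _ (by omega), PySem.List.pyRange_one]
  have := pv_walk_xy a (x1 - x0) 1 x0 y0 (PySem.Int.floordiv (x1 - x0) 2) ((x1 + 1 - x0).toNat)
  rw [this]
  exact pv_core_asc a (x1 - x0) x0 y0 (PySem.Int.floordiv (x1 - x0) 2) ((x1 + 1 - x0).toNat)

theorem pv_asc_case_pos (a x0 y0 x1 : Int) (h : x0 ≤ x1)
    (hc : ((PySem.List.pyRange x0 (x1 + 1) 1).foldl (pvF a (x1 - x0))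
            ([], [], y0, PySem.Int.floordiv (x1 - x0) 2)).2.1.isEmpty = true) :
    PySem.List.sorted
      ((PySem.List.pyRange x0 (x1 + 1) 1).foldl
        (fun (st : List (Int × Int) × Int × Int) x =>
          if st.2.2 - a < 0 then (st.1 ++ [(x, st.2.1)], st.2.1 + 1, st.2.2 - a + (x1 - x0))
          else (st.1 ++ [(x, st.2.1)], st.2.1, st.2.2 - a))
        ([], y0, PySem.Int.truncdiv (x1 - x0) 2)).1 (fun p => p.2) true
    = ((PySem.List.pyRange x0 (x1 + 1) 1).foldl (pvF a (x1 - x0))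
        ([], [], y0, PySem.Int.floordiv (x1 - x0) 2)).1.reverse.flatten := by
  have hx := pv_asc_case a x0 y0 x1 h
  rw [if_pos hc] at hx
  exact hx

theorem pv_asc_case_neg (a x0 y0 x1 : Int) (h : x0 ≤ x1)
    (hc : ¬ ((PySem.List.pyRange x0 (x1 + 1) 1).foldl (pvF a (x1 - x0))
            ([], [], y0, PySem.Int.floordiv (x1 - x0) 2)).2.1.isEmpty = true) :
    PySem.List.sorted
      ((PySem.List.pyRange x0 (x1 + 1) 1).foldl
        (fun (st : List (Int × Int) × Int × Int) x =>
          if st.2.2 - a < 0 then (st.1 ++ [(x, st.2.1)], st.2.1 + 1, st.2.2 - a + (x1 - x0))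
          else (st.1 ++ [(x, st.2.1)], st.2.1, st.2.2 - a))
        ([], y0, PySem.Int.truncdiv (x1 - x0) 2)).1 (fun p => p.2) true
    = (((PySem.List.pyRange x0 (x1 + 1) 1).foldl (pvF a (x1 - x0))
        ([], [], y0, PySem.Int.floordiv (x1 - x0) 2)).1 ++
        [((PySem.List.pyRange x0 (x1 + 1) 1).foldl (pvF a (x1 - x0))
        ([], [], y0, PySem.Int.floordiv (x1 - x0) 2)).2.1]).reverse.flatten := by
  have hx := pv_asc_case a x0 y0 x1 h
  rw [if_neg hc] at hx
  exact hx

theorem pv_main (s e : Int × Int) : bressenhelm s e = bressenhelm_alt s e := by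
  simp only [bressenhelm, bressenhelm_alt]
  split_ifs with h1 h2 h3 h4 h5 h6 h7 h8 h9 h10 h11 h12 <;> dsimp only at * <;>
    first
      | (exfalso; omega)
      | (exact pv_rot_case _ _ _ _ _ (by omega))
      | (exact pv_desc_case _ _ _ _ (by omega))
      | (exact pv_asc_case_pos _ _ _ _ (by omega) (by assumption))
      | (exact pv_asc_case_neg _ _ _ _ (by omega) (by assumption))

-- ===== VERDICT (by name: the statement is the Claim_ definition above) =====
theorem bressenhelm_spec : Claim_equal_bressenhelm := by
  intro s e _
  exact pv_main s e
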